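-- pv_equiv track=rewrite | github.com/scottconverse/opinionforge-ai | opinionforge/exporters/medium.py | _insert_drop_cap
-- ===== SOURCE A (Python) =====
-- def _insert_drop_cap(text: str) -> str:
--     """Insert a '> DROP CAP' marker before the first non-empty, non-heading paragraph.
--
--     Args:
--         text: The body markdown text.
--
--     Returns:
--         The text with the DROP CAP marker inserted before the first paragraph.
--     """
--     lines = text.splitlines()
--     result: list[str] = []
--     inserted = False
--     i = 0
--     while i < len(lines):
--         line = lines[i]
--         if not inserted and line.strip() and not line.startswith("#") and not line.startswith(">"):
--             result.append("> DROP CAP")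
--             inserted = True
--         result.append(line)
--         i += 1
--     return "\n".join(result)
-- ===== SOURCE B (Python) =====
-- def _insert_drop_cap(text: str) -> str:
--     """Search-then-splice: find the first qualifying line, insert the marker there."""
--     lines = text.splitlines()
--     idx = next(
--         (i for i, line in enumerate(lines)
--          if line.strip() and not line.startswith("#") and not line.startswith(">")),
--         None,
--     )
--     if idx is not None:
--         lines.insert(idx, "> DROP CAP")
--     return "\n".join(lines)
-- ===== Notes on version B (the rewrite author's own statement) =====
-- stated objective: simpler
-- what changed: Replaces A's single appending pass guarded by a boolean insertion flag with a two-phase search-then-splice: find the first qualifying line index with next(enumerate(...)), then one list.insert, then join.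
import Mathlib
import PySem

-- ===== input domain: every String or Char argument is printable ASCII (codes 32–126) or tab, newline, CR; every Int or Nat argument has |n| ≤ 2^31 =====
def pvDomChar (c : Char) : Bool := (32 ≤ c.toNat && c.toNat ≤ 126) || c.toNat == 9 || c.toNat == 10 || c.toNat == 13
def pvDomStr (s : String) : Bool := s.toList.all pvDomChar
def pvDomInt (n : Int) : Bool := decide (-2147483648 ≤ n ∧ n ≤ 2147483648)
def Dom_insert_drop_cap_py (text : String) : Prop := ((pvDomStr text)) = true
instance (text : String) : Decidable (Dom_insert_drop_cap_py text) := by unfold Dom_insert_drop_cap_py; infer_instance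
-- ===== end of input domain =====

-- B replaces A's single flag-guarded appending pass by a search-then-splice decomposition
-- (find the first qualifying index, then one list insert); objective: simpler, same cost.

-- ===== PORT A =====
-- while loop over the lines with an accumulator list and an 'inserted' flag, as in A
def insert_drop_cap_py (text : String) : String :=
  let lines := PySem.Str.splitlines text
  let st := lines.foldl
    (fun (st : List String × Bool) line =>
      if !st.2 && PySem.Str.strip line != "" && !PySem.Str.startswith line "#"
          && !PySem.Str.startswith line ">" then
        (st.1 ++ ["> DROP CAP", line], true)
      else
        (st.1 ++ [line], st.2))
    ([], false)
  PySem.Str.join "\n" st.1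

-- ===== PORT B =====
-- B's predicate for the generator expression
def dropCapLineOk (line : String) : Bool :=
  PySem.Str.strip line != "" && !PySem.Str.startswith line "#" && !PySem.Str.startswith line ">"

def insert_drop_cap_py_alt (text : String) : String :=
  let lines := PySem.Str.splitlines text
  let lines' :=
    match lines.findIdx? dropCapLineOk with
    | some i => PySem.List.insert lines (i : Int) "> DROP CAP"
    | none => lines
  PySem.Str.join "\n" lines'

-- ===== PRECONDITION & SPEC =====
def Spec_insert_drop_cap_py (text : String) (out : String) : Prop := out = insert_drop_cap_py_alt text
instance (text : String) (out : String) : Decidable (Spec_insert_drop_cap_py text out) := by unfold Spec_insert_drop_cap_py; infer_instance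

-- ===== CLAIM (what is proved, stated in full; the proofs are below) =====
def Claim_equal_insert_drop_cap_py : Prop := ∀ (text : String), Dom_insert_drop_cap_py text → Spec_insert_drop_cap_py text (insert_drop_cap_py text)

-- ===== LEMMAS AND PROOFS =====

-- A's loop body, named for the proofs (definitionally the lambda in the port)
def pvStepA : List String × Bool → String → List String × Bool :=
  fun st line =>
    if !st.2 && PySem.Str.strip line != "" && !PySem.Str.startswith line "#"
        && !PySem.Str.startswith line ">" then
      (st.1 ++ ["> DROP CAP", line], true)
    else
      (st.1 ++ [line], st.2)

lemma pvStepA_false (acc : List String) (line : String) :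
    pvStepA (acc, false) line =
      if dropCapLineOk line then (acc ++ ["> DROP CAP", line], true) else (acc ++ [line], false) := by
  simp [pvStepA, dropCapLineOk, Bool.and_assoc]

lemma foldl_stepA_true (lines : List String) (acc : List String) :
    lines.foldl pvStepA (acc, true) = (acc ++ lines, true) := by
  induction lines generalizing acc with
  | nil => simp
  | cons l rest ih => simp [pvStepA, ih]

lemma foldl_stepA_false (lines : List String) (acc : List String) :
    (lines.foldl pvStepA (acc, false)).1 =
      acc ++ (match lines.findIdx? dropCapLineOk with
              | some i => PySem.List.insert lines (i : Int) "> DROP CAP"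
              | none => lines) := by
  induction lines generalizing acc with
  | nil => simp
  | cons l rest ih =>
    rw [List.foldl_cons, pvStepA_false]
    by_cases h : dropCapLineOk l
    · simp [h, foldl_stepA_true, PySem.List.insert_zero, List.findIdx?_cons]
    · simp only [h, ih, List.findIdx?_cons, Bool.false_eq_true, if_neg, not_false_iff]
      cases hf : rest.findIdx? dropCapLineOk with
      | none => simp
      | some i =>
        have hi : i < rest.length := by
          rw [List.findIdx?_eq_some_iff_findIdx_eq] at hf; exact hf.1
        have h1 : PySem.List.insert (l :: rest) ((i + 1 : Nat) : Int) "> DROP CAP"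
            = l :: PySem.List.insert rest (i : Int) "> DROP CAP" := by
          rw [PySem.List.insert_natCast _ _ _ (by simpa using Nat.succ_le_succ hi.le),
              PySem.List.insert_natCast _ _ _ hi.le]
          simp
        simp [Option.map_some, ← h1]

-- ===== VERDICT (by name: the statement is the Claim_ definition above) =====
theorem insert_drop_cap_py_spec : Claim_equal_insert_drop_cap_py := by
  intro text _
  show insert_drop_cap_py text = insert_drop_cap_py_alt text
  unfold insert_drop_cap_py insert_drop_cap_py_alt
  have h := foldl_stepA_false (PySem.Str.splitlines text) []
  simp only [List.nil_append] at h
  show PySem.Str.join "\n" (List.foldl pvStepA ([], false) (PySem.Str.splitlines text)).1 =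
    PySem.Str.join "\n" (match List.findIdx? dropCapLineOk (PySem.Str.splitlines text) with
      | some i => PySem.List.insert (PySem.Str.splitlines text) (i : Int) "> DROP CAP"
      | none => PySem.Str.splitlines text)
  rw [h]
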